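-- pv_equiv track=rewrite | github.com/JorgeCM2004/Advent-of-code-2024 | Day_3/Problem_2/D3_P2.py | clear_disables
-- ===== SOURCE A (Python) =====
-- from typing import Literal
--
-- def clear_disables(line: str, status: Literal["continue", "erase"] = "continue"):
-- 	line = list(line)
-- 	enables = "do()"
-- 	disables = "don't()"
-- 	string_index = 0
-- 	iterator = 0
-- 	while iterator < len(line):
-- 		char = line[iterator]
-- 		if status == "continue":
-- 			if string_index >= len(disables):
-- 				status = "erase"
-- 				string_index = 0
-- 				iterator -= 1
-- 			elif char == disables[string_index]:
-- 				string_index += 1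
-- 			else:
-- 				string_index = 0
-- 			iterator += 1
-- 		else:
-- 			if string_index >= len(enables):
-- 				status = "continue"
-- 				string_index = 0
-- 			elif char == enables[string_index]:
-- 				string_index += 1
-- 				line.pop(iterator)
-- 			else:
-- 				string_index = 0
-- 				line.pop(iterator)
-- 	return "".join(line), status
-- ===== SOURCE B (Python) =====
-- def clear_disables(line, status="continue"):
--     disables = "don't()"
--     enables = "do()"
--     out = []
--     idx = 0
--     for ch in line:
--         # apply a pending mode switch before processing this char
--         if status == "continue":
--             if idx >= len(disables):
--                 status, idx = "erase", 0
--         else: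
--             if idx >= len(enables):
--                 status, idx = "continue", 0
--         if status == "continue":
--             idx = idx + 1 if ch == disables[idx] else 0
--             out.append(ch)
--         else:
--             idx = idx + 1 if ch == enables[idx] else 0
--     return "".join(out), status
-- ===== Notes on version B (the rewrite author's own statement) =====
-- stated objective: faster
-- what changed: Replaced the in-place list with repeated list.pop(i) shifting and iterator backtracking by a single forward pass that applies the pending mode switch to the current character and appends kept characters to an output list.
import Mathlib
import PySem

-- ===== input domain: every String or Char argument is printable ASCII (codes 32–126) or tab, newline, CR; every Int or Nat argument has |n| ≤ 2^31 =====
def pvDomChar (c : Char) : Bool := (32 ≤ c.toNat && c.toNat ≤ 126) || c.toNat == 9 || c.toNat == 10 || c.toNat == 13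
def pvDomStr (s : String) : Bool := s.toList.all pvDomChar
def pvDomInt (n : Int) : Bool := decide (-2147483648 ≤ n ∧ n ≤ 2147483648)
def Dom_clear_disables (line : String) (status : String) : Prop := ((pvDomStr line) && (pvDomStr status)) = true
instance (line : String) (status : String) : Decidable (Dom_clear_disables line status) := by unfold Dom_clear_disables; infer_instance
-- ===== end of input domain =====

-- B replaces A's quadratic pop-and-backtrack while loop by one linear forward pass
-- that appends kept characters to an output list (objective: faster, asymptotic).

-- ===== PORT A =====
-- A's while loop: `line` as mutable char list, `iterator` index, pops in erase mode,
-- the `iterator -= 1; iterator += 1` in the continue→erase switch nets to an unchanged index.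
def clearALoop (line : List Char) (status : String) (si : Nat) (i : Nat) :
    List Char × String :=
  if h : i < line.length then
    let c := getElem line i h
    if status = "continue" then
      if si ≥ 7 then
        -- status = "erase"; string_index = 0; iterator -= 1; iterator += 1
        clearALoop line "erase" 0 i
      else if c = List.getD ("don't()".toList) si ' ' then
        clearALoop line status (si + 1) (i + 1)
      else
        clearALoop line status 0 (i + 1)
    else
      if si ≥ 4 then
        clearALoop line "continue" 0 i
      else if c = List.getD ("do()".toList) si ' ' then
        clearALoop (line.eraseIdx i) status (si + 1) i
      else
        clearALoop (line.eraseIdx i) status 0 i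
  else
    (line, status)
termination_by 2 * (line.length - i) +
  (if (status = "continue" ∧ si ≥ 7) ∨ (¬ status = "continue" ∧ si ≥ 4) then 1 else 0)
decreasing_by
  all_goals simp_all [List.length_eraseIdx]
  all_goals first
    | omega
    | (split_ifs <;> omega)

def clear_disables (line : String) (status : String) : String × String :=
  let r := clearALoop line.toList status 0 0
  (String.ofList r.1, r.2)

-- ===== PORT B =====
-- B's for loop over the characters, building `out` (held reversed in `acc`).
def clearBLoop (cs : List Char) (status : String) (idx : Nat) (acc : List Char) :
    List Char × String :=
  match cs with
  | [] => (acc.reverse, status)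
  | c :: rest =>
    -- apply a pending mode switch before processing this char
    let p : String × Nat :=
      if status = "continue" then
        if idx ≥ 7 then ("erase", 0) else (status, idx)
      else
        if idx ≥ 4 then ("continue", 0) else (status, idx)
    if p.1 = "continue" then
      clearBLoop rest p.1 (if c = List.getD ("don't()".toList) p.2 ' ' then p.2 + 1 else 0) (c :: acc)
    else
      clearBLoop rest p.1 (if c = List.getD ("do()".toList) p.2 ' ' then p.2 + 1 else 0) acc

def clear_disables_alt (line : String) (status : String) : String × String :=
  let r := clearBLoop line.toList status 0 []
  (String.ofList r.1, r.2)

-- ===== PRECONDITION & SPEC =====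
def Spec_clear_disables (line : String) (status : String) (out : String × String) : Prop := out = clear_disables_alt line status
instance (line : String) (status : String) (out : String × String) : Decidable (Spec_clear_disables line status out) := by unfold Spec_clear_disables; infer_instance

-- ===== CLAIM (what is proved, stated in full; the proofs are below) =====
def Claim_equal_clear_disables : Prop := ∀ (line : String) (status : String), Dom_clear_disables line status → Spec_clear_disables line status (clear_disables line status)

-- ===== LEMMAS AND PROOFS =====

theorem eraseIdx_append_cons (kept : List Char) (c : Char) (rest : List Char) :
    (kept ++ c :: rest).eraseIdx kept.length = kept ++ rest := by
  induction kept with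
  | nil => simp
  | cons x xs ih => simp [ih]

theorem getElem_append_len (kept : List Char) (c : Char) (rest : List Char)
    (h : kept.length < (kept ++ c :: rest).length) :
    getElem (kept ++ c :: rest) kept.length h = c := by
  simp

-- invariant: A's list is kept-prefix ++ unread suffix, iterator = prefix length;
-- B holds the kept prefix reversed in acc.
theorem loop_agree (rest : List Char) :
    ∀ (kept : List Char) (status : String) (si : Nat),
      clearALoop (kept ++ rest) status si kept.length =
        clearBLoop rest status si kept.reverse := by
  induction rest with
  | nil =>
    intro kept status si
    rw [clearALoop]
    simp [clearBLoop]
  | cons c rest ih =>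
    intro kept status si
    have hkeep : ∀ (st : String) (j : Nat),
        clearALoop (kept ++ c :: rest) st j (kept.length + 1) =
          clearBLoop rest st j (c :: kept.reverse) := by
      intro st j
      have h := ih (kept ++ [c]) st j
      simpa using h
    have hdrop : ∀ (st : String) (j : Nat),
        clearALoop (kept ++ rest) st j kept.length =
          clearBLoop rest st j kept.reverse := fun st j => ih kept st j
    rw [clearALoop]
    have hlt : kept.length < (kept ++ c :: rest).length := by simp
    simp only [hlt, dite_true, getElem_append_len]
    by_cases hs : status = "continue"
    · subst hs
      by_cases h7 : si ≥ 7
      · -- pending switch to erase; A reprocesses the char in erase mode with si = 0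
        rw [if_pos rfl, if_pos h7, clearALoop]
        simp only [hlt, dite_true, getElem_append_len]
        rw [if_neg (by decide : ¬ ("erase" : String) = "continue"),
          if_neg (by omega : ¬ (0 : Nat) ≥ 4), eraseIdx_append_cons]
        conv_rhs => rw [clearBLoop]
        simp [h7]
        split <;> exact hdrop _ _
      · rw [if_pos rfl, if_neg h7]
        conv_rhs => rw [clearBLoop]
        simp [h7]
        split <;> exact hkeep _ _
    · by_cases h4 : si ≥ 4
      · -- pending switch back to continue; A reprocesses the char in continue mode
        rw [if_neg hs, if_pos h4, clearALoop]
        simp only [hlt, dite_true, getElem_append_len]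
        rw [if_neg (by omega : ¬ (0 : Nat) ≥ 7)]
        conv_rhs => rw [clearBLoop]
        simp [hs, h4]
        split <;> exact hkeep _ _
      · rw [if_neg hs, if_neg h4, eraseIdx_append_cons]
        conv_rhs => rw [clearBLoop]
        simp [hs, h4]
        split <;> exact hdrop _ _

-- ===== VERDICT (by name: the statement is the Claim_ definition above) =====
theorem clear_disables_spec : Claim_equal_clear_disables := by
  intro line status _
  unfold Spec_clear_disables clear_disables clear_disables_alt
  have := loop_agree line.toList [] status 0
  simp only [List.nil_append, List.length_nil, List.reverse_nil] at this
  rw [this]
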